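-- pv_equiv track=rewrite | github.com/Joker7822/num3_v4 | numbers3_predictor.py | extract_matched_predictions
-- ===== SOURCE A (Python) =====
-- def extract_matched_predictions(predictions, true_data, min_match=2):
--     matched = []
--     for pred in predictions:
--         for true in true_data:
--             if len(set(pred) & set(true)) >= min_match:
--                 matched.append(pred)
--                 break
--     return matched
-- ===== SOURCE B (Python) =====
-- def extract_matched_predictions(predictions, true_data, min_match=2):
--     # Inverted index: digit -> indices of true rows containing it (built once).
--     index = {}
--     for j, true in enumerate(true_data):
--         for d in set(true):
--             index.setdefault(d, []).append(j)
--     n = len(true_data)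
--     matched = []
--     for pred in predictions:
--         counts = [0] * n
--         for d in set(pred):
--             for j in index.get(d, []):
--                 counts[j] += 1
--         if any(c >= min_match for c in counts):
--             matched.append(pred)
--     return matched
-- ===== Notes on version B (the rewrite author's own statement) =====
-- stated objective: faster
-- what changed: Instead of rescanning all of true_data and rebuilding set(true) for every prediction, B builds an inverted index digit->list of true-row indices once and, per prediction, tallies per-row overlap counts from index lookups only.
import Mathlib
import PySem

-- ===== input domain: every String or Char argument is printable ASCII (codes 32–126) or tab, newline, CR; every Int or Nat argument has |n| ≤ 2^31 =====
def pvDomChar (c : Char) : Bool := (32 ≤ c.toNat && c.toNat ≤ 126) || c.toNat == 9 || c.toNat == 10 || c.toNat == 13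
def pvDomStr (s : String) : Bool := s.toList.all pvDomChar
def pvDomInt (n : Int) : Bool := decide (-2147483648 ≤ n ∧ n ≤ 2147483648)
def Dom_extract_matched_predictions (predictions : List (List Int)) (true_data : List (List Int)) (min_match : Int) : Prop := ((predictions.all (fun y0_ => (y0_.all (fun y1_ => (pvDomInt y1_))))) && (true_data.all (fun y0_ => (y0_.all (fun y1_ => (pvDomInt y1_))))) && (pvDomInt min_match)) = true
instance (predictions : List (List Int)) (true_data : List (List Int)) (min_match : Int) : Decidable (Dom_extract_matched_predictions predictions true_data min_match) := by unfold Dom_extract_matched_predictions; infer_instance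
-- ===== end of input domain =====

-- ===== PORT A =====
-- B replaces A's per-prediction rescan of true_data by a once-built inverted index; objective: faster.
def pvAInner (matched : List (List Int)) (pred : List Int) (td : List (List Int)) (mm : Int) : List (List Int) :=
  match td with
  | [] => matched
  | t :: rest =>
    if mm ≤ PySem.Set.len (PySem.Set.inter (PySem.Set.ofList pred) (PySem.Set.ofList t))
    then matched ++ [pred]
    else pvAInner matched pred rest mm

def extract_matched_predictions (predictions : List (List Int)) (true_data : List (List Int)) (min_match : Int) : List (List Int) :=
  predictions.foldl (fun matched pred => pvAInner matched pred true_data min_match) []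

-- ===== PORT B =====
-- counts[j] += 1
def pvBBump (counts : List Int) (j : Int) : List Int :=
  PySem.List.pySetD counts j (PySem.List.pyGetD counts j 0 + 1)

-- index = {}; for j, true in enumerate(true_data): for d in set(true): index.setdefault(d, []).append(j)
def pvBIndex (td : List (List Int)) : PySem.Dict Int (List Int) :=
  (PySem.List.enumerate td 0).foldl
    (fun idx jt => (PySem.Set.ofList jt.2).foldl
      (fun idx d => idx.modify d [] (fun l => l ++ [jt.1])) idx)
    PySem.Dict.empty

-- counts = [0] * n; for d in set(pred): for j in index.get(d, []): counts[j] += 1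
def pvBCounts (idx : PySem.Dict Int (List Int)) (pred : List Int) (n : Nat) : List Int :=
  (PySem.Set.ofList pred).foldl
    (fun counts d => (idx.getD d []).foldl (fun counts j => pvBBump counts j) counts)
    (List.replicate n 0)

def extract_matched_predictions_alt (predictions : List (List Int)) (true_data : List (List Int)) (min_match : Int) : List (List Int) :=
  let idx := pvBIndex true_data
  let n := true_data.length
  predictions.foldl
    (fun matched pred =>
      if (pvBCounts idx pred n).any (fun c => min_match ≤ c) then matched ++ [pred] else matched)
    []

-- ===== PRECONDITION & SPEC =====
def Spec_extract_matched_predictions (predictions : List (List Int)) (true_data : List (List Int)) (min_match : Int) (out : List (List Int)) : Prop := out = extract_matched_predictions_alt predictions true_data min_match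
instance (predictions : List (List Int)) (true_data : List (List Int)) (min_match : Int) (out : List (List Int)) : Decidable (Spec_extract_matched_predictions predictions true_data min_match out) := by unfold Spec_extract_matched_predictions; infer_instance

-- ===== CLAIM (what is proved, stated in full; the proofs are below) =====
def Claim_equal_extract_matched_predictions : Prop := ∀ (predictions : List (List Int)) (true_data : List (List Int)) (min_match : Int), Dom_extract_matched_predictions predictions true_data min_match → Spec_extract_matched_predictions predictions true_data min_match (extract_matched_predictions predictions true_data min_match)

-- ===== LEMMAS AND PROOFS =====

-- overlap size used by A, as a countP over the deduped prediction
def pvOv (p t : List Int) : Int :=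
  PySem.Set.len (PySem.Set.inter (PySem.Set.ofList p) (PySem.Set.ofList t))

theorem pvOv_eq_countP (p t : List Int) :
    pvOv p t = ((PySem.Set.ofList p).countP (fun d => decide (d ∈ t)) : Nat) := by
  unfold pvOv PySem.Set.len PySem.Set.inter
  rw [List.countP_eq_length_filter]
  congr 2
  apply List.filter_congr
  intro x _
  simp [PySem.Set.contains_eq_listContains, PySem.Set.mem_ofList]

theorem pvAInner_eq (matched : List (List Int)) (pred : List Int) (td : List (List Int)) (mm : Int) :
    pvAInner matched pred td mm
      = matched ++ (if td.any (fun t => decide (mm ≤ pvOv pred t)) then [pred] else []) := by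
  induction td generalizing matched with
  | nil => simp [pvAInner]
  | cons t rest ih =>
    by_cases h : mm ≤ pvOv pred t
    · simp only [pvAInner, pvOv, PySem.Set.len] at h ⊢
      simp [h]
    · simp only [pvAInner, pvOv, PySem.Set.len] at h ⊢
      rw [if_neg (by omega), ih]
      have hfalse : ¬ (mm ≤ ((((PySem.Set.ofList pred).inter (PySem.Set.ofList t)).length : Int))) := by omega
      simp [List.any_cons, pvOv, PySem.Set.len, hfalse]

-- filter by equality on a Nodup list
theorem pv_filter_beq_nodup (c : Int) (s : List Int) (hs : s.Nodup) :
    s.filter (fun d => d == c) = if c ∈ s then [c] else [] := by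
  induction s with
  | nil => simp
  | cons x rest ih =>
    rcases List.nodup_cons.mp hs with ⟨hx, hrest⟩
    by_cases hxc : x = c
    · subst hxc
      simp [hx, ih hrest]
    · simp [hxc, ih hrest, Ne.symm hxc]

theorem pv_flatMap_if_singleton {α β : Type} (l : List α) (p : α → Bool) (f : α → β) :
    l.flatMap (fun x => if p x then [f x] else []) = (l.filter p).map f := by
  induction l with
  | nil => simp
  | cons x rest ih =>
    by_cases hx : p x <;> simp [hx, ih]

-- the inverted index lists exactly the (first components of) true rows containing c
theorem pvBIndex_getD (td : List (List Int)) (c : Int) :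
    (pvBIndex td).getD c []
      = ((PySem.List.enumerate td 0).filter (fun jt => decide (c ∈ jt.2))).map (fun jt => jt.1) := by
  have h1 : pvBIndex td
      = ((PySem.List.enumerate td 0).flatMap
          (fun jt => (PySem.Set.ofList jt.2).map (fun d => (d, jt.1)))).foldl
          (fun idx p => idx.modify p.1 [] (fun l => l ++ [p.2])) PySem.Dict.empty := by
    rw [List.foldl_flatMap]
    unfold pvBIndex
    apply PySem.List.foldl_congr_mem
    intro acc jt _
    rw [List.foldl_map]
  rw [h1, PySem.Dict.getD_foldl_modify_append]
  rw [List.filter_flatMap, List.map_flatMap]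
  have h2 : ∀ jt : Int × List Int,
      ((((PySem.Set.ofList jt.2).map (fun d => (d, jt.1))).filter (fun p => p.1 == c)).map (fun p => p.2))
        = if decide (c ∈ jt.2) then [jt.1] else [] := by
    intro jt
    rw [List.filter_map, List.map_map]
    have : ((PySem.Set.ofList jt.2).filter (fun d => d == c)) = if c ∈ jt.2 then [c] else [] := by
      rw [pv_filter_beq_nodup c _ (PySem.Set.nodup_ofList jt.2)]
      simp [PySem.Set.mem_ofList]
    rw [show ((fun p => p.1 == c) ∘ fun d => (d, jt.1)) = fun d => d == c from rfl, this]
    by_cases h : c ∈ jt.2 <;> simp [h]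
  calc ((PySem.List.enumerate td 0).flatMap
        (fun jt => ((((PySem.Set.ofList jt.2).map (fun d => (d, jt.1))).filter (fun p => p.1 == c)).map (fun p => p.2))))
      = (PySem.List.enumerate td 0).flatMap (fun jt => if decide (c ∈ jt.2) then [jt.1] else []) := by
        simp only [List.flatMap_def]
        congr 1
        exact List.map_congr_left (fun jt _ => h2 jt)
    _ = _ := pv_flatMap_if_singleton _ _ _

-- membership in an index list
theorem pv_mem_index (td : List (List Int)) (c : Int) (j : Nat) (hj : j < td.length) :
    ((↑j : Int) ∈ (pvBIndex td).getD c []) ↔ c ∈ td[j] := by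
  rw [pvBIndex_getD]
  constructor
  · rintro hm
    rcases List.mem_map.mp hm with ⟨jt, hjt, hfst⟩
    rcases List.mem_filter.mp hjt with ⟨hmem, hpred⟩
    rcases (PySem.List.mem_enumerate_iff td 0 jt).mp hmem with ⟨k, hk, rfl⟩
    simp at hpred hfst
    have : k = j := by exact_mod_cast hfst
    subst this
    exact hpred
  · intro hc
    apply List.mem_map.mpr
    refine ⟨((j : Int), td[j]), ?_, rfl⟩
    apply List.mem_filter.mpr
    refine ⟨(PySem.List.mem_enumerate_iff td 0 _).mpr ⟨j, hj, by simp⟩, by simpa using hc⟩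

-- every entry of an index list is a valid row index
theorem pv_index_entries (td : List (List Int)) (c : Int) :
    ∀ x ∈ (pvBIndex td).getD c [], ∃ k : Nat, x = (k : Int) ∧ k < td.length := by
  intro x hx
  rw [pvBIndex_getD] at hx
  rcases List.mem_map.mp hx with ⟨jt, hjt, hfst⟩
  rcases List.mem_filter.mp hjt with ⟨hmem, _⟩
  rcases (PySem.List.mem_enumerate_iff td 0 jt).mp hmem with ⟨k, hk, rfl⟩
  exact ⟨k, by simpa using hfst.symm, hk⟩

-- index lists are nodup (row indices are strictly increasing)
theorem pv_index_nodup (td : List (List Int)) (c : Int) :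
    ((pvBIndex td).getD c []).Nodup := by
  rw [pvBIndex_getD]
  apply List.Pairwise.map
  · intro a b h
    exact Int.ne_of_lt h
  · exact List.Pairwise.filter _ (PySem.List.pairwise_lt_enumerate td 0)

theorem pvBBump_foldl_length (js : List Int) (counts : List Int) :
    (js.foldl (fun counts j => pvBBump counts j) counts).length = counts.length := by
  induction js generalizing counts with
  | nil => rfl
  | cons x rest ih =>
    rw [List.foldl_cons, ih]
    simp [pvBBump, PySem.List.length_pySetD]

theorem pvBBump_foldl_get (js : List Int) (counts : List Int)
    (hjs : ∀ x ∈ js, ∃ k : Nat, x = (k : Int) ∧ k < counts.length)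
    (j : Nat) (hj : j < counts.length) :
    PySem.List.pyGetD (js.foldl (fun counts j => pvBBump counts j) counts) (↑j) 0
      = PySem.List.pyGetD counts (↑j) 0 + js.count (↑j) := by
  induction js generalizing counts with
  | nil => simp
  | cons x rest ih =>
    rcases hjs x (List.mem_cons_self) with ⟨k, rfl, hk⟩
    have hlen : (pvBBump counts (↑k)).length = counts.length := by
      simp [pvBBump]
    have hrest : ∀ y ∈ rest, ∃ m : Nat, y = (m : Int) ∧ m < (pvBBump counts (↑k)).length := by
      intro y hy
      rcases hjs y (List.mem_cons_of_mem _ hy) with ⟨m, rfl, hm⟩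
      exact ⟨m, rfl, by omega⟩
    rw [List.foldl_cons, ih (pvBBump counts (↑k)) hrest (by omega)]
    rw [show pvBBump counts (↑k) = PySem.List.pySetD counts (↑k) (PySem.List.pyGetD counts (↑k) 0 + 1) from rfl]
    rw [PySem.List.pyGetD_pySetD_natCast counts k j _ _ hk]
    by_cases hjk : j = k
    · subst hjk
      rw [if_pos rfl, List.count_cons]
      simp only [beq_self_eq_true, if_true]
      push_cast
      ring
    · have hne : ¬ ((k : Int) = (j : Int)) := by
        intro h
        exact hjk (by exact_mod_cast h.symm)
      rw [if_neg hjk, List.count_cons]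
      simp only [beq_iff_eq, hne, if_false]
      push_cast
      ring

-- the final count at row j is the overlap of pred with row j
theorem pvBCounts_get (td : List (List Int)) (pred : List Int) (j : Nat) (hj : j < td.length) :
    PySem.List.pyGetD (pvBCounts (pvBIndex td) pred td.length) (↑j) 0
      = ((PySem.Set.ofList pred).countP (fun d => decide ((↑j : Int) ∈ (pvBIndex td).getD d [])) : Nat) := by
  unfold pvBCounts
  suffices h : ∀ (ds : List Int) (counts : List Int), counts.length = td.length →
      PySem.List.pyGetD
        (ds.foldl (fun counts d => (((pvBIndex td).getD d []).foldl (fun counts j => pvBBump counts j) counts)) counts)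
        (↑j) 0
      = PySem.List.pyGetD counts (↑j) 0 + (ds.countP (fun d => decide ((↑j : Int) ∈ (pvBIndex td).getD d [])) : Nat) by
    rw [h (PySem.Set.ofList pred) (List.replicate td.length 0) (by simp)]
    simp [PySem.List.pyGetD_natCast, hj]
  intro ds
  induction ds with
  | nil => intro counts _; simp
  | cons d rest ih =>
    intro counts hlen
    have hjs := pv_index_entries td d
    have hjs' : ∀ x ∈ (pvBIndex td).getD d [], ∃ k : Nat, x = (k : Int) ∧ k < counts.length := by
      intro x hx; rcases hjs x hx with ⟨k, rfl, hk⟩; exact ⟨k, rfl, by omega⟩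
    have hcnt : (((pvBIndex td).getD d []).count ((j : Int)))
        = if ((j : Int)) ∈ (pvBIndex td).getD d [] then 1 else 0 := by
      by_cases hmem : ((j : Int)) ∈ (pvBIndex td).getD d []
      · simp [hmem, List.count_eq_one_of_mem (pv_index_nodup td d) hmem]
      · simp [hmem, List.count_eq_zero_of_not_mem]
    have hlen' : (((pvBIndex td).getD d []).foldl (fun counts j => pvBBump counts j) counts).length = td.length := by
      rw [pvBBump_foldl_length]; exact hlen
    rw [List.foldl_cons, ih _ hlen']
    rw [pvBBump_foldl_get _ counts hjs' j (by omega), hcnt]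
    by_cases hmem : ((j : Int)) ∈ (pvBIndex td).getD d []
    · simp [hmem]
      ring
    · simp [hmem]

theorem pvBCounts_length (idx : PySem.Dict Int (List Int)) (pred : List Int) (n : Nat) :
    (pvBCounts idx pred n).length = n := by
  unfold pvBCounts
  suffices h : ∀ (ds : List Int) (counts : List Int),
      (ds.foldl (fun counts d => ((idx.getD d []).foldl (fun counts j => pvBBump counts j) counts)) counts).length
        = counts.length by
    rw [h]; simp
  intro ds
  induction ds with
  | nil => intro counts; rfl
  | cons d rest ih => intro counts; rw [List.foldl_cons, ih, pvBBump_foldl_length]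

-- B's decision for one prediction equals A's decision
theorem pv_decision_eq (td : List (List Int)) (pred : List Int) (mm : Int) :
    ((pvBCounts (pvBIndex td) pred td.length).any (fun c => mm ≤ c))
      = td.any (fun t => decide (mm ≤ pvOv pred t)) := by
  have hlen := pvBCounts_length (pvBIndex td) pred td.length
  rw [Bool.eq_iff_iff, List.any_eq_true, List.any_eq_true]
  constructor
  · rintro ⟨x, hx, hmm⟩
    rcases List.mem_iff_getElem.mp hx with ⟨j, hjl, rfl⟩
    have hj : j < td.length := by omega
    have hx' : (pvBCounts (pvBIndex td) pred td.length)[j]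
        = PySem.List.pyGetD (pvBCounts (pvBIndex td) pred td.length) (↑j) 0 := by
      rw [PySem.List.pyGetD_natCast]
      rw [List.getD_eq_getElem _ _ hjl]
    rw [hx', pvBCounts_get td pred j hj] at hmm
    refine ⟨td[j], List.getElem_mem hj, ?_⟩
    simp only [decide_eq_true_eq] at hmm ⊢
    rw [pvOv_eq_countP]
    have hcongr : (PySem.Set.ofList pred).countP (fun d => decide ((↑j : Int) ∈ (pvBIndex td).getD d []))
        = (PySem.Set.ofList pred).countP (fun d => decide (d ∈ td[j])) := by
      apply List.countP_congr
      intro d _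
      simp [pv_mem_index td d j hj]
    rw [hcongr] at hmm
    exact hmm
  · rintro ⟨t, ht, hmm⟩
    rcases List.mem_iff_getElem.mp ht with ⟨j, hj, rfl⟩
    refine ⟨(pvBCounts (pvBIndex td) pred td.length)[j]'(by omega), List.getElem_mem _, ?_⟩
    have hx' : (pvBCounts (pvBIndex td) pred td.length)[j]'(by omega)
        = PySem.List.pyGetD (pvBCounts (pvBIndex td) pred td.length) (↑j) 0 := by
      rw [PySem.List.pyGetD_natCast]
      rw [List.getD_eq_getElem _ _ (by omega)]
    rw [hx', pvBCounts_get td pred j hj]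
    simp only [decide_eq_true_eq] at hmm ⊢
    rw [pvOv_eq_countP] at hmm
    have hcongr : (PySem.Set.ofList pred).countP (fun d => decide ((↑j : Int) ∈ (pvBIndex td).getD d []))
        = (PySem.Set.ofList pred).countP (fun d => decide (d ∈ td[j])) := by
      apply List.countP_congr
      intro d _
      simp [pv_mem_index td d j hj]
    rw [hcongr]
    exact hmm

-- ===== VERDICT (by name: the statement is the Claim_ definition above) =====
theorem extract_matched_predictions_spec : Claim_equal_extract_matched_predictions := by
  intro preds td mm _
  unfold Spec_extract_matched_predictions
  unfold extract_matched_predictions extract_matched_predictions_alt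
  have hA : (fun (matched : List (List Int)) (pred : List Int) => pvAInner matched pred td mm)
      = fun matched pred => if td.any (fun t => decide (mm ≤ pvOv pred t)) then matched ++ [pred] else matched := by
    funext matched pred
    rw [pvAInner_eq]
    by_cases h : td.any (fun t => decide (mm ≤ pvOv pred t)) <;> simp [h]
  rw [hA]
  simp only []
  rw [PySem.List.foldl_append_if_eq_filter, PySem.List.foldl_append_if_eq_filter]
  simp only [List.nil_append]
  apply List.filter_congr
  intro pred _
  exact (pv_decision_eq td pred mm).symm
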